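-- pv_equiv track=rewrite | github.com/xiaoxuanfu/Depressed-Detective | metrics/eval_utils.py | extract_factors
-- ===== SOURCE A (Python) =====
-- def extract_factors(n):
--     if (n == 0) or (n == 1):
--         return [n]
--
--     factor_list = []
--     i = 2
--     while i < n:
--         if n % i == 0:
--             factor_list.append(i)
--         i += 1
--
--     return factor_list
-- ===== SOURCE B (Python) =====
-- def extract_factors(n):
--     if n == 0 or n == 1:
--         return [n]
--     small = []
--     large = []
--     i = 2
--     while i * i <= n:
--         if n % i == 0:
--             small.append(i)
--             j = n // i
--             if j != i:
--                 large.append(j)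
--         i += 1
--     return small + large[::-1]
-- ===== Notes on version B (the rewrite author's own statement) =====
-- stated objective: faster
-- what changed: Instead of trial-dividing by every candidate below n, B enumerates divisors only up to the square root of n, records each divisor and its cofactor, and appends the cofactors in reverse to keep ascending order.
import Mathlib
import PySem

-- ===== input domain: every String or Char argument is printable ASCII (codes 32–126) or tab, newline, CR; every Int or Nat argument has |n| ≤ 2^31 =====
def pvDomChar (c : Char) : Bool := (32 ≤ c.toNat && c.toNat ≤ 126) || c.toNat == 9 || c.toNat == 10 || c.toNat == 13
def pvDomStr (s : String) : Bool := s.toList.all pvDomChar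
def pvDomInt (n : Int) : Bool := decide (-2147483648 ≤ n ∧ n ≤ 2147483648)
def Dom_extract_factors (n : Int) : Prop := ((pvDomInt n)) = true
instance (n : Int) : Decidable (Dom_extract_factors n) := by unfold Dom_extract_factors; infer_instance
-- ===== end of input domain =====

-- B replaces A's linear trial division over all candidates below n by divisor-pair enumeration up to the square root (asymptotically faster, same exact output).


-- ===== PORT A =====
-- while i < n: if n % i == 0: factor_list.append(i); i += 1
def extractLoopA (n i : Int) (acc : List Int) : List Int :=
  if i < n then
    extractLoopA n (i + 1) (if PySem.Int.mod n i == 0 then acc ++ [i] else acc)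
  else acc
termination_by (n - i).toNat
decreasing_by omega

def extract_factors (n : Int) : List Int :=
  if n == 0 || n == 1 then [n]
  else extractLoopA n 2 []

-- ===== PORT B =====
-- while i*i <= n: if n % i == 0: small.append(i); j = n // i; if j != i: large.append(j); i += 1
def extractLoopB (n i : Int) (small large : List Int) : List Int × List Int :=
  if i * i ≤ n then
    if PySem.Int.mod n i == 0 then
      extractLoopB n (i + 1) (small ++ [i])
        (if PySem.Int.floordiv n i != i then large ++ [PySem.Int.floordiv n i] else large)
    else extractLoopB n (i + 1) small large
  else (small, large)
termination_by (n + 1 - i).toNat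
decreasing_by
  · have : i ≤ n := by nlinarith [sq_nonneg (i - 1)]
    omega
  · have : i ≤ n := by nlinarith [sq_nonneg (i - 1)]
    omega

def extract_factors_alt (n : Int) : List Int :=
  if n == 0 || n == 1 then [n]
  else
    let p := extractLoopB n 2 [] []
    p.1 ++ p.2.reverse

-- ===== PRECONDITION & SPEC =====
def Spec_extract_factors (n : Int) (out : List Int) : Prop := out = extract_factors_alt n
instance (n : Int) (out : List Int) : Decidable (Spec_extract_factors n out) := by unfold Spec_extract_factors; infer_instance

-- ===== CLAIM (what is proved, stated in full; the proofs are below) =====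
def Claim_equal_extract_factors : Prop := ∀ (n : Int), Dom_extract_factors n → Spec_extract_factors n (extract_factors n)

-- ===== LEMMAS AND PROOFS =====

-- accumulator-free versions of the loops
def divsA (n i : Int) : List Int :=
  if i < n then (if n % i = 0 then [i] else []) ++ divsA n (i + 1) else []
termination_by (n - i).toNat
decreasing_by omega

def smalls (n i : Int) : List Int :=
  if i * i ≤ n then (if n % i = 0 then [i] else []) ++ smalls n (i + 1) else []
termination_by (n + 1 - i).toNat
decreasing_by
  have : i ≤ n := by nlinarith [sq_nonneg (i - 1)]
  omega

def larges (n i : Int) : List Int :=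
  if i * i ≤ n then (if n % i = 0 ∧ n / i ≠ i then [n / i] else []) ++ larges n (i + 1) else []
termination_by (n + 1 - i).toNat
decreasing_by
  have : i ≤ n := by nlinarith [sq_nonneg (i - 1)]
  omega

theorem extractLoopA_eq (n i : Int) :
    0 < i → ∀ acc, extractLoopA n i acc = acc ++ divsA n i := by
  induction i using divsA.induct (n := n) with
  | case1 i h ih =>
    intro hi acc
    rw [extractLoopA, divsA, if_pos h, if_pos h,
      PySem.Int.mod_eq_emod_of_pos hi, ih (by omega)]
    by_cases hmod : n % i = 0 <;> simp [hmod]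
  | case2 i h =>
    intro hi acc
    rw [extractLoopA, divsA, if_neg h, if_neg h, List.append_nil]

theorem extractLoopB_eq (n i : Int) :
    0 < i → ∀ small large,
      extractLoopB n i small large = (small ++ smalls n i, large ++ larges n i) := by
  induction i using smalls.induct (n := n) with
  | case1 i h ih =>
    intro hi small large
    rw [extractLoopB, if_pos h, smalls, if_pos h, larges, if_pos h,
      PySem.Int.mod_eq_emod_of_pos hi, PySem.Int.floordiv_eq_ediv_of_pos hi]
    by_cases hmod : n % i = 0
    · rw [if_pos (by simp [hmod]), ih (by omega)]
      by_cases hj : n / i = i <;> simp [hmod, hj]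
    · rw [if_neg (by simp [hmod]), ih (by omega)]
      simp [hmod]
  | case2 i h =>
    intro hi small large
    rw [extractLoopB, if_neg h, smalls, if_neg h, larges, if_neg h]; simp

theorem mem_divsA (n i d : Int) : d ∈ divsA n i ↔ i ≤ d ∧ d < n ∧ n % d = 0 := by
  induction i using divsA.induct (n := n) with
  | case1 i h ih =>
    rw [divsA, if_pos h]
    simp only [List.mem_append, ih]
    constructor
    · rintro (hd | ⟨h1, h2, h3⟩)
      · by_cases hmod : n % i = 0
        · rw [if_pos hmod] at hd; simp at hd; subst hd; exact ⟨le_rfl, h, hmod⟩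
        · rw [if_neg hmod] at hd; simp at hd
      · exact ⟨by omega, h2, h3⟩
    · rintro ⟨h1, h2, h3⟩
      rcases eq_or_lt_of_le h1 with rfl | h4
      · exact Or.inl (by simp [h3])
      · exact Or.inr ⟨by omega, h2, h3⟩
  | case2 i h =>
    rw [divsA, if_neg h]; simp; omega

theorem mem_smalls (n i d : Int) (hi : 0 < i) :
    d ∈ smalls n i ↔ i ≤ d ∧ d * d ≤ n ∧ n % d = 0 := by
  induction i using smalls.induct (n := n) with
  | case1 i h ih =>
    rw [smalls, if_pos h]
    simp only [List.mem_append, ih (by omega)]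
    constructor
    · rintro (hd | ⟨h1, h2, h3⟩)
      · by_cases hmod : n % i = 0
        · rw [if_pos hmod] at hd; simp at hd; subst hd; exact ⟨le_rfl, h, hmod⟩
        · rw [if_neg hmod] at hd; simp at hd
      · exact ⟨by omega, h2, h3⟩
    · rintro ⟨h1, h2, h3⟩
      rcases eq_or_lt_of_le h1 with rfl | h4
      · exact Or.inl (by simp [h3])
      · exact Or.inr ⟨by omega, h2, h3⟩
  | case2 i h =>
    rw [smalls, if_neg h]; simp
    intro h1 h2
    exfalso
    exact h (le_trans (by nlinarith) h2)

theorem mem_larges (n i j : Int) (hi : 0 < i) :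
    j ∈ larges n i ↔ ∃ d, i ≤ d ∧ d * d ≤ n ∧ n % d = 0 ∧ j = n / d ∧ j ≠ d := by
  induction i using larges.induct (n := n) with
  | case1 i h ih =>
    rw [larges, if_pos h]
    simp only [List.mem_append, ih (by omega)]
    constructor
    · rintro (hd | ⟨d, h1, h2, h3, h4, h5⟩)
      · by_cases hc : n % i = 0 ∧ n / i ≠ i
        · rw [if_pos hc] at hd; simp at hd; subst hd
          exact ⟨i, le_rfl, h, hc.1, rfl, hc.2⟩
        · rw [if_neg hc] at hd; simp at hd
      · exact ⟨d, by omega, h2, h3, h4, h5⟩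
    · rintro ⟨d, h1, h2, h3, h4, h5⟩
      rcases eq_or_lt_of_le h1 with rfl | h6
      · exact Or.inl (by rw [if_pos ⟨h3, h4 ▸ h5⟩]; simp [h4])
      · exact Or.inr ⟨d, by omega, h2, h3, h4, h5⟩
  | case2 i h =>
    rw [larges, if_neg h]; simp
    intro d h1 h2
    exfalso
    exact h (le_trans (by nlinarith) h2)

theorem sorted_divsA (n i : Int) : (divsA n i).Pairwise (· < ·) := by
  induction i using divsA.induct (n := n) with
  | case1 i h ih =>
    rw [divsA, if_pos h]
    refine List.pairwise_append.mpr ⟨?_, ih, ?_⟩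
    · split <;> simp
    · intro x hx y hy
      by_cases hmod : n % i = 0
      · rw [if_pos hmod] at hx; simp at hx; rw [hx]
        have := (mem_divsA n (i + 1) y).1 hy
        omega
      · rw [if_neg hmod] at hx; simp at hx
  | case2 i h =>
    rw [divsA, if_neg h]; simp

theorem sorted_smalls (n i : Int) (hi : 0 < i) : (smalls n i).Pairwise (· < ·) := by
  induction i using smalls.induct (n := n) with
  | case1 i h ih =>
    rw [smalls, if_pos h]
    refine List.pairwise_append.mpr ⟨?_, ih (by omega), ?_⟩
    · split <;> simp
    · intro x hx y hy
      by_cases hmod : n % i = 0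
      · rw [if_pos hmod] at hx; simp at hx; rw [hx]
        have := ((mem_smalls n (i + 1) y (by omega)).1 hy).1
        omega
      · rw [if_neg hmod] at hx; simp at hx
  | case2 i h =>
    rw [smalls, if_neg h]; simp

theorem sorted_larges (n i : Int) (hi : 0 < i) : (larges n i).Pairwise (· > ·) := by
  induction i using larges.induct (n := n) with
  | case1 i h ih =>
    rw [larges, if_pos h]
    refine List.pairwise_append.mpr ⟨?_, ih (by omega), ?_⟩
    · split <;> simp
    · intro x hx y hy
      by_cases hc : n % i = 0 ∧ n / i ≠ i
      · rw [if_pos hc] at hx; simp at hx; rw [hx]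
        obtain ⟨d, h1, h2, h3, h4, h5⟩ := (mem_larges n (i + 1) y (by omega)).1 hy
        have hdn : d * (n / d) = n := by
          have := Int.ediv_mul_cancel (Int.dvd_of_emod_eq_zero h3); linarith [this]
        have hin : i * (n / i) = n := by
          have := Int.ediv_mul_cancel (Int.dvd_of_emod_eq_zero hc.1); linarith [this]
        have hnpos : 0 < n := by nlinarith
        have hypos : 0 < y := by
          rcases lt_trichotomy y 0 with hy0 | hy0 | hy0
          · exfalso; nlinarith [h4 ▸ hdn]
          · exfalso; subst h4; nlinarith [hdn]
          · exact hy0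
        subst h4
        nlinarith [hdn, hin]
      · rw [if_neg hc] at hx; simp at hx
  | case2 i h =>
    rw [larges, if_neg h]; simp

-- facts about an element of `larges n 2`: a genuine divisor above the square root
theorem larges_elim (n y : Int) (hn : 2 ≤ n) (hy : y ∈ larges n 2) :
    2 ≤ y ∧ y < n ∧ n % y = 0 ∧ n < y * y := by
  obtain ⟨d, hd2, hdd, hdm, rfl, hne⟩ := (mem_larges n 2 y (by norm_num)).1 hy
  have hdvd : d ∣ n := Int.dvd_of_emod_eq_zero hdm
  have hdn : n / d * d = n := Int.ediv_mul_cancel hdvd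
  have hypos : 0 < n / d := by nlinarith
  have hdy : d < n / d := by
    rcases eq_or_lt_of_le (show d ≤ n / d by nlinarith) with heq | hlt
    · exact absurd heq.symm hne
    · exact hlt
  have hyy : n < n / d * (n / d) := by nlinarith
  refine ⟨by omega, by nlinarith, ?_, hyy⟩
  exact Int.emod_eq_zero_of_dvd ⟨d, by linarith⟩

theorem main_eq (n : Int) (hn : 2 ≤ n) :
    divsA n 2 = smalls n 2 ++ (larges n 2).reverse := by
  have sA := sorted_divsA n 2
  have sS := sorted_smalls n 2 (by norm_num)
  have sL : ((larges n 2).reverse).Pairwise (· < ·) :=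
    List.pairwise_reverse.mpr (sorted_larges n 2 (by norm_num))
  have cross : ∀ x ∈ smalls n 2, ∀ y ∈ (larges n 2).reverse, x < y := by
    intro x hx y hy
    obtain ⟨hx2, hxx, -⟩ := (mem_smalls n 2 x (by norm_num)).1 hx
    obtain ⟨hy2, -, -, hyy⟩ := larges_elim n y hn (List.mem_reverse.mp hy)
    nlinarith
  have sB : (smalls n 2 ++ (larges n 2).reverse).Pairwise (· < ·) :=
    List.pairwise_append.mpr ⟨sS, sL, cross⟩
  have memiff : ∀ a, a ∈ divsA n 2 ↔ a ∈ smalls n 2 ++ (larges n 2).reverse := by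
    intro a
    rw [mem_divsA, List.mem_append, List.mem_reverse]
    constructor
    · rintro ⟨ha2, han, ham⟩
      have hdvd : a ∣ n := Int.dvd_of_emod_eq_zero ham
      have hda : n / a * a = n := Int.ediv_mul_cancel hdvd
      by_cases hsm : a * a ≤ n
      · exact Or.inl ((mem_smalls n 2 a (by norm_num)).2 ⟨ha2, hsm, ham⟩)
      · refine Or.inr ((mem_larges n 2 a (by norm_num)).2 ⟨n / a, ?_, ?_, ?_, ?_, ?_⟩)
        · nlinarith
        · nlinarith
        · exact Int.emod_eq_zero_of_dvd ⟨a, by linarith⟩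
        · have hd0 : n / a ≠ 0 := by intro h0; rw [h0] at hda; omega
          exact (Int.ediv_eq_of_eq_mul_left hd0 (by linarith [hda])).symm
        · intro hEq
          rw [← hEq] at hda
          nlinarith
    · rintro (hs | hl)
      · obtain ⟨ha2, haa, ham⟩ := (mem_smalls n 2 a (by norm_num)).1 hs
        exact ⟨ha2, by nlinarith, ham⟩
      · obtain ⟨ha2, han, ham, -⟩ := larges_elim n a hn hl
        exact ⟨ha2, han, ham⟩
  have ndA : (divsA n 2).Nodup := sA.imp (fun h => ne_of_lt h)
  have ndB : (smalls n 2 ++ (larges n 2).reverse).Nodup := sB.imp (fun h => ne_of_lt h)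
  exact List.Perm.eq_of_pairwise (fun a b _ _ h h' => absurd h' (lt_asymm h)) sA sB
    ((List.perm_ext_iff_of_nodup ndA ndB).mpr memiff)

-- ===== VERDICT (by name: the statement is the Claim_ definition above) =====
theorem extract_factors_spec : Claim_equal_extract_factors := by
  intro n _
  show extract_factors n = extract_factors_alt n
  rw [extract_factors, extract_factors_alt]
  by_cases h01 : (n == 0 || n == 1) = true
  · rw [if_pos h01, if_pos h01]
  · rw [if_neg h01, if_neg h01]
    rw [extractLoopA_eq n 2 (by norm_num) [], extractLoopB_eq n 2 (by norm_num) [] []]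
    simp only [List.nil_append]
    by_cases hn : 2 ≤ n
    · exact main_eq n hn
    · have hneg : n < 0 := by simp at h01; omega
      rw [divsA, if_neg (by omega), smalls, if_neg (by nlinarith), larges,
        if_neg (by nlinarith)]
      simp
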